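-- pv_equiv track=rewrite | github.com/Skubinski/SoftUni_Education | 02_Programming Fundamentals with Python Course/15_Bitwise_Operations/01_Binary_digit_count.py | binary_number
-- ===== SOURCE A (Python) =====
-- def binary_number (a, b):
--
--     binary_digit = 0
--     while a > 0:
--         remainer = a % 2
--         a = int(a / 2)
--         if remainer == b:
--             binary_digit += 1
--     return binary_digit
-- ===== SOURCE B (Python) =====
-- def binary_number(a, b):
--     # Aggregate formulation: popcount + bit_length instead of a bit-by-bit loop.
--     if a <= 0:
--         return 0
--     ones = bin(a).count('1')
--     if b == 1:
--         return ones
--     if b == 0: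
--         return a.bit_length() - ones
--     return 0
-- ===== Notes on version B (the rewrite author's own statement) =====
-- stated objective: simpler
-- what changed: Replaces the bit-by-bit division loop with a closed-form computation from the aggregate counts bin(a).count('1') (popcount) and a.bit_length(), branching once on b.
import Mathlib
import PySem

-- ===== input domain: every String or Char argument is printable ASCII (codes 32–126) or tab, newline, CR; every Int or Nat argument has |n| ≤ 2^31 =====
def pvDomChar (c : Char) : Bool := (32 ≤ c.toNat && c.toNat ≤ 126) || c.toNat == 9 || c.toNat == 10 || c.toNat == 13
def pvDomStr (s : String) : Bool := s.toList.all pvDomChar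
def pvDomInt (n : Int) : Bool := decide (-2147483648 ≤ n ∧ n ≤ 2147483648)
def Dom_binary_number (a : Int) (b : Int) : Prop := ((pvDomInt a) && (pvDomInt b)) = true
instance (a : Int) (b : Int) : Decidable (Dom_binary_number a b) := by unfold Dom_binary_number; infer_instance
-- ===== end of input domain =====

-- B replaces A's bit-by-bit division loop by a closed form from popcount and bit_length (objective: simpler).

-- ===== PORT A =====
-- the while-loop of A; int(a / 2) is PySem.Int.truncdiv a 2 (exact: |a| ≤ 2^31 < 2^53)
def binaryLoopA (a b acc : Int) : Int :=
  if h : 0 < a then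
    let remainer := PySem.Int.mod a 2
    binaryLoopA (PySem.Int.truncdiv a 2) b (if remainer = b then acc + 1 else acc)
  else acc
termination_by a.toNat
decreasing_by
  simp only [PySem.Int.truncdiv]
  have h1 : a.tdiv 2 = a / 2 := Int.tdiv_eq_ediv_of_nonneg (by omega)
  omega

def binary_number (a : Int) (b : Int) : Int := binaryLoopA a b 0

-- ===== PORT B =====
def binary_number_alt (a : Int) (b : Int) : Int :=
  if a ≤ 0 then 0
  else
    let ones : Int := (PySem.Int.bitCount a : Int)
    if b = 1 then ones
    else if b = 0 then ((PySem.Int.bitLength a : Int) - ones)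
    else 0

-- ===== PRECONDITION & SPEC =====
def Spec_binary_number (a : Int) (b : Int) (out : Int) : Prop := out = binary_number_alt a b
instance (a : Int) (b : Int) (out : Int) : Decidable (Spec_binary_number a b out) := by unfold Spec_binary_number; infer_instance

-- ===== CLAIM (what is proved, stated in full; the proofs are below) =====
def Claim_equal_binary_number : Prop := ∀ (a : Int) (b : Int), Dom_binary_number a b → Spec_binary_number a b (binary_number a b)

-- ===== LEMMAS AND PROOFS =====

theorem binaryLoopA_eq (n : Nat) : ∀ (b acc : Int),
    binaryLoopA (n : Int) b acc =
      acc + (if b = 1 then (PySem.Int.bitCount (n : Int) : Int)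
             else if b = 0 then (PySem.Int.bitLength (n : Int) : Int) - (PySem.Int.bitCount (n : Int) : Int)
             else 0) := by
  induction n using Nat.strong_induction_on with
  | _ n ih =>
  intro b acc
  rcases Nat.eq_zero_or_pos n with h0 | h0
  · subst h0
    rw [binaryLoopA]
    have hz : ¬ (0:Int) < ((0:Nat):Int) := by decide
    rw [dif_neg (by exact_mod_cast hz)]
    split_ifs <;> simp [PySem.Int.bitCount, PySem.Int.bitLength]
  · rw [binaryLoopA]
    have hpos : (0:Int) < (n:Int) := by exact_mod_cast h0
    rw [dif_pos hpos]
    have hmod : PySem.Int.mod (n:Int) 2 = ((n % 2 : Nat) : Int) := by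
      exact_mod_cast PySem.Int.mod_natCast n 2
    have hdiv : PySem.Int.truncdiv (n:Int) 2 = ((n / 2 : Nat) : Int) := by
      show ((n:Int)).tdiv 2 = _
      rw [Int.tdiv_eq_ediv_of_nonneg (by positivity)]
      exact_mod_cast rfl
    simp only [hmod, hdiv]
    rw [ih (n/2) (Nat.div_lt_self h0 one_lt_two)]
    have hbc : PySem.Int.bitCount (n:Int) = n % 2 + PySem.Int.bitCount ((n/2 : Nat) : Int) :=
      PySem.Int.bitCount_natCast h0
    have hbl : PySem.Int.bitLength (n:Int) = PySem.Int.bitLength ((n/2 : Nat) : Int) + 1 :=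
      PySem.Int.bitLength_natCast h0
    rw [hbc, hbl]
    rcases Nat.mod_two_eq_zero_or_one n with h2 | h2 <;>
      rw [h2] <;> split_ifs <;> push_cast <;> omega

-- ===== VERDICT (by name: the statement is the Claim_ definition above) =====
theorem binary_number_spec : Claim_equal_binary_number := by
  intro a b _
  unfold Spec_binary_number binary_number binary_number_alt
  by_cases ha : a ≤ 0
  · rw [binaryLoopA, dif_neg (by omega), if_pos ha]
  · rw [if_neg ha]
    have hcast : a = ((a.toNat : Nat) : Int) := by omega
    rw [hcast, binaryLoopA_eq]
    simp
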